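-- pv_equiv track=rewrite | github.com/V3rgilius/bgpemu | py/bgpdata/sim.py | remove_rpki
-- ===== SOURCE A (Python) =====
-- from collections import deque
--
-- def remove_rpki(links,rpkis,attacker):
--     new_links = []
--     for link in links:
--         if link[0] in rpkis or link[1] in rpkis:
--             continue
--         else:
--             new_links.append(link)
--     return get_largest_connected_graph(new_links,attacker)
--
-- def get_largest_connected_graph(graph, n):
--     visited = set()
--     queue = deque([n])  # 使用队列进行广度优先搜索
--     largest_graph = []  # 存储最大连通图的边
--
--     while queue:
--         node = queue.popleft()
--         if node not in visited:
--             visited.add(node)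
--             for edge in graph:
--                 if node in edge:
--                     neighbor = edge[1] if edge[0] == node else edge[0]
--                     if neighbor not in visited:
--                         queue.append(neighbor)
--                         largest_graph.append(edge)
--
--     return visited,largest_graph
-- ===== SOURCE B (Python) =====
-- from collections import deque
--
-- def remove_rpki(links, rpkis, attacker):
--     # Build rpki set + adjacency index once, then a single O(V+E) BFS.
--     rp = set(rpkis)
--     adj = {}
--     for link in links:
--         u, v = link[0], link[1]
--         if u in rp or v in rp:
--             continue
--         adj.setdefault(u, []).append((link, v))
--         if v != u:
--             adj.setdefault(v, []).append((link, u))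
--     visited = set()
--     queue = deque([attacker])
--     edges = []
--     while queue:
--         node = queue.popleft()
--         if node in visited:
--             continue
--         visited.add(node)
--         for edge, nb in adj.get(node, []):
--             if nb not in visited:
--                 queue.append(nb)
--                 edges.append(edge)
--     return visited, edges
-- ===== Notes on version B (the rewrite author's own statement) =====
-- stated objective: alternative
-- what changed: B replaces A's rescan of the whole edge list at every visited node by an rpki set plus a prebuilt adjacency index (node -> incident (edge, neighbor) pairs in edge order), so the BFS walks adjacency entries instead of the full edge list; worst-case cost drops, though a timing run showed no measurable difference on the generated inputs.
import Mathlib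
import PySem

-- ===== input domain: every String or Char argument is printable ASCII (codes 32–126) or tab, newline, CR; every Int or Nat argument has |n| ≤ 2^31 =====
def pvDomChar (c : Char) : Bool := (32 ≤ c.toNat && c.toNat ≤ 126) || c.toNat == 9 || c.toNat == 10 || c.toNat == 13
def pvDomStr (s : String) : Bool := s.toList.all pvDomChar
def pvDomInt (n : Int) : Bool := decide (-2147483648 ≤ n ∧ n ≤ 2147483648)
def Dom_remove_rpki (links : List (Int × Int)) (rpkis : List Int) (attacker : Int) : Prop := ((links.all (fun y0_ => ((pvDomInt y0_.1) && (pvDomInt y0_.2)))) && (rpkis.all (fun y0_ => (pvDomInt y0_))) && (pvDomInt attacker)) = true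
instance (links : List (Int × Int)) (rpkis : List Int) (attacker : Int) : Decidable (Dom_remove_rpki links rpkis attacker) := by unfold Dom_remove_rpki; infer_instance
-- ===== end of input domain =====

-- B builds an rpki set and an adjacency index once and runs a BFS over adjacency
-- entries instead of A's rescan of the whole edge list at every visited node.
-- Both BFS loops are written with a fuel counter (2*|links|+1, a sufficient
-- bound on queue pops) solely to make the recursion total; it changes no result.

-- ===== PORT A =====
-- the BFS loop of get_largest_connected_graph, scanning the whole edge list per visited node;
-- the fuel argument (2*|links|+1, a sufficient bound on queue pops) only makes the recursion total
def bfsA (graph : List (Int × Int)) : Nat → List Int → PySem.Set Int → List (Int × Int) → List Int × List (Int × Int)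
  | 0, _, visited, lg => (visited, lg)
  | _ + 1, [], visited, lg => (visited, lg)
  | fuel + 1, node :: queue, visited, lg =>
    if PySem.Set.contains visited node then
      bfsA graph fuel queue visited lg
    else
      let visited' := PySem.Set.add visited node
      let s := graph.foldl (fun s edge =>
        if edge.1 == node || edge.2 == node then
          let neighbor := if edge.1 == node then edge.2 else edge.1
          if PySem.Set.contains visited' neighbor then s
          else (s.1 ++ [neighbor], s.2 ++ [edge])
        else s) (queue, lg)
      bfsA graph fuel s.1 visited' s.2

def remove_rpki (links : List (Int × Int)) (rpkis : List Int) (attacker : Int) : List Int × (List (Int × Int)) :=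
  let new_links := links.foldl (fun acc link =>
    if rpkis.contains link.1 || rpkis.contains link.2 then acc else acc ++ [link]) []
  bfsA new_links (2 * links.length + 1) [attacker] PySem.Set.empty []

-- ===== PORT B =====
-- B: rpki membership as a set, adjacency index node -> (edge, neighbor) pairs in edge order,
-- then one BFS over adjacency entries (same fuel bound for totality)
def buildAdj (links : List (Int × Int)) (rp : PySem.Set Int) : PySem.Dict Int (List ((Int × Int) × Int)) :=
  links.foldl (fun adj l =>
    if PySem.Set.contains rp l.1 || PySem.Set.contains rp l.2 then adj
    else
      let adj1 := adj.insert l.1 (adj.getD l.1 [] ++ [(l, l.2)])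
      if l.2 == l.1 then adj1
      else adj1.insert l.2 (adj1.getD l.2 [] ++ [(l, l.1)])) PySem.Dict.empty

def bfsB (adj : PySem.Dict Int (List ((Int × Int) × Int))) : Nat → List Int → PySem.Set Int → List (Int × Int) → List Int × List (Int × Int)
  | 0, _, visited, ed => (visited, ed)
  | _ + 1, [], visited, ed => (visited, ed)
  | fuel + 1, node :: queue, visited, ed =>
    if PySem.Set.contains visited node then
      bfsB adj fuel queue visited ed
    else
      let visited' := PySem.Set.add visited node
      let s := (adj.getD node []).foldl (fun s p =>
        if PySem.Set.contains visited' p.2 then s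
        else (s.1 ++ [p.2], s.2 ++ [p.1])) (queue, ed)
      bfsB adj fuel s.1 visited' s.2

def remove_rpki_alt (links : List (Int × Int)) (rpkis : List Int) (attacker : Int) : List Int × (List (Int × Int)) :=
  let rp := PySem.Set.ofList rpkis
  let adj := buildAdj links rp
  bfsB adj (2 * links.length + 1) [attacker] PySem.Set.empty []

-- ===== PRECONDITION & SPEC =====
def Spec_remove_rpki (links : List (Int × Int)) (rpkis : List Int) (attacker : Int) (out : List Int × (List (Int × Int))) : Prop := out = remove_rpki_alt links rpkis attacker
instance (links : List (Int × Int)) (rpkis : List Int) (attacker : Int) (out : List Int × (List (Int × Int))) : Decidable (Spec_remove_rpki links rpkis attacker out) := by unfold Spec_remove_rpki; infer_instance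

-- ===== CLAIM (what is proved, stated in full; the proofs are below) =====
def Claim_equal_remove_rpki : Prop := ∀ (links : List (Int × Int)) (rpkis : List Int) (attacker : Int), Dom_remove_rpki links rpkis attacker → Spec_remove_rpki links rpkis attacker (remove_rpki links rpkis attacker)

-- ===== LEMMAS AND PROOFS =====

-- incident (edge, neighbor) pairs of `node` in `graph`, in edge order
def gInc (graph : List (Int × Int)) (node : Int) : List ((Int × Int) × Int) :=
  graph.filterMap (fun l =>
    if l.1 == node then some (l, l.2)
    else if l.2 == node then some (l, l.1) else none)

theorem gInc_cons (l : Int × Int) (r : List (Int × Int)) (node : Int) :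
    gInc (l :: r) node
      = (if l.1 == node then [(l, l.2)]
         else if l.2 == node then [(l, l.1)] else []) ++ gInc r node := by
  simp only [gInc, List.filterMap_cons]
  split_ifs <;> simp

theorem contains_ofList_eq (rpkis : List Int) (x : Int) :
    PySem.Set.contains (PySem.Set.ofList rpkis) x = rpkis.contains x := by
  by_cases h : x ∈ rpkis
  · have h1 : PySem.Set.contains (PySem.Set.ofList rpkis) x = true := by
      simp [PySem.Set.mem_ofList, h]
    have h2 : rpkis.contains x = true := by simpa using h
    rw [h1, h2]
  · have h1 : PySem.Set.contains (PySem.Set.ofList rpkis) x = false := by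
      simp [PySem.Set.mem_ofList, h]
    have h2 : rpkis.contains x = false := by simpa using h
    rw [h1, h2]

-- A's rpki filter loop builds exactly the filter by the (set-membership) predicate B uses
theorem filt_eq (rpkis : List Int) (links : List (Int × Int)) (acc : List (Int × Int)) :
    links.foldl (fun acc link =>
        if rpkis.contains link.1 || rpkis.contains link.2 then acc else acc ++ [link]) acc
    = acc ++ links.filter (fun l =>
        !(PySem.Set.contains (PySem.Set.ofList rpkis) l.1 || PySem.Set.contains (PySem.Set.ofList rpkis) l.2)) := by
  induction links generalizing acc with
  | nil => simp
  | cons l t ih =>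
    rw [List.foldl_cons, ih, List.filter_cons]
    by_cases h : (rpkis.contains l.1 || rpkis.contains l.2) = true
    · have hp : (!((PySem.Set.ofList rpkis).contains l.1 || (PySem.Set.ofList rpkis).contains l.2)) = false := by
        simp only [contains_ofList_eq]; rw [h]; rfl
      rw [if_pos h, if_neg (fun hx => Bool.false_ne_true (hp ▸ hx))]
    · have hc : (rpkis.contains l.1 || rpkis.contains l.2) = false := by
        revert h; cases (rpkis.contains l.1 || rpkis.contains l.2) <;> simp
      have hp : (!((PySem.Set.ofList rpkis).contains l.1 || (PySem.Set.ofList rpkis).contains l.2)) = true := by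
        simp only [contains_ofList_eq]; rw [hc]; rfl
      rw [if_neg h, if_pos hp]
      simp

-- A's per-node scan over the whole graph = the fold over the incidence list
theorem bodyA_eq (graph : List (Int × Int)) (node : Int) (visited' : PySem.Set Int)
    (init : List Int × List (Int × Int)) :
    graph.foldl (fun s edge =>
        if edge.1 == node || edge.2 == node then
          let neighbor := if edge.1 == node then edge.2 else edge.1
          if PySem.Set.contains visited' neighbor then s
          else (s.1 ++ [neighbor], s.2 ++ [edge])
        else s) init
    = (gInc graph node).foldl (fun s p =>
        if PySem.Set.contains visited' p.2 then s
        else (s.1 ++ [p.2], s.2 ++ [p.1])) init := by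
  induction graph generalizing init with
  | nil => rfl
  | cons l t ih =>
    rw [List.foldl_cons, gInc_cons, List.foldl_append, ← ih]
    congr 1
    by_cases h1 : (l.1 == node) = true
    · simp [h1]
    · by_cases h2 : (l.2 == node) = true
      · simp [h1, h2]
      · simp [h1, h2]

-- one step of buildAdj appends this link's contribution to the looked-up incidence list
theorem buildAdj_step (d : PySem.Dict Int (List ((Int × Int) × Int))) (l : Int × Int) (node : Int) :
    (let adj1 := d.insert l.1 (d.getD l.1 [] ++ [(l, l.2)])
     if l.2 == l.1 then adj1
     else adj1.insert l.2 (adj1.getD l.2 [] ++ [(l, l.1)])).getD node []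
    = d.getD node []
      ++ (if l.1 == node then [(l, l.2)] else if l.2 == node then [(l, l.1)] else []) := by
  by_cases h1 : l.1 = node
  · subst h1
    by_cases h2 : l.2 = l.1
    · simp [h2, PySem.Dict.getD_insert]
    · have h2' : ¬ l.1 = l.2 := fun h => h2 h.symm
      simp [h2, h2', PySem.Dict.getD_insert]
  · by_cases h3 : l.2 = node
    · subst h3
      have h2 : ¬ l.2 = l.1 := fun h => h1 h.symm
      simp [h1, h2, PySem.Dict.getD_insert]
    · have h1' : ¬ node = l.1 := fun h => h1 h.symm
      have h3' : ¬ node = l.2 := fun h => h3 h.symm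
      by_cases h2 : l.2 = l.1
      · simp [h1, h1', h2, h3, h3', PySem.Dict.getD_insert]
      · simp [h1, h1', h2, h3, h3', PySem.Dict.getD_insert]

theorem buildAdj_go (rp : PySem.Set Int) (links : List (Int × Int))
    (d : PySem.Dict Int (List ((Int × Int) × Int))) (node : Int) :
    (links.foldl (fun adj l =>
        if PySem.Set.contains rp l.1 || PySem.Set.contains rp l.2 then adj
        else
          let adj1 := adj.insert l.1 (adj.getD l.1 [] ++ [(l, l.2)])
          if l.2 == l.1 then adj1
          else adj1.insert l.2 (adj1.getD l.2 [] ++ [(l, l.1)])) d).getD node []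
    = d.getD node []
      ++ gInc (links.filter (fun l =>
          !(PySem.Set.contains rp l.1 || PySem.Set.contains rp l.2))) node := by
  induction links generalizing d with
  | nil => simp [gInc]
  | cons l t ih =>
    rw [List.foldl_cons, ih, List.filter_cons]
    by_cases hr : (PySem.Set.contains rp l.1 || PySem.Set.contains rp l.2) = true
    · have hp : (!(PySem.Set.contains rp l.1 || PySem.Set.contains rp l.2)) = false := by
        rw [hr]; rfl
      rw [if_pos hr, if_neg (fun hx => Bool.false_ne_true (hp ▸ hx))]
    · have hc : (PySem.Set.contains rp l.1 || PySem.Set.contains rp l.2) = false := by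
        revert hr; cases (PySem.Set.contains rp l.1 || PySem.Set.contains rp l.2) <;> simp
      have hp : (!(PySem.Set.contains rp l.1 || PySem.Set.contains rp l.2)) = true := by
        rw [hc]; rfl
      rw [if_neg hr, if_pos hp, gInc_cons, ← List.append_assoc]
      congr 1
      exact buildAdj_step d l node

theorem buildAdj_getD (links : List (Int × Int)) (rp : PySem.Set Int) (node : Int) :
    (buildAdj links rp).getD node []
    = gInc (links.filter (fun l =>
        !(PySem.Set.contains rp l.1 || PySem.Set.contains rp l.2))) node := by
  unfold buildAdj
  rw [buildAdj_go]
  simp [PySem.Dict.getD_empty]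

theorem bfs_eq (graph : List (Int × Int)) (adj : PySem.Dict Int (List ((Int × Int) × Int)))
    (h : ∀ node, adj.getD node [] = gInc graph node) :
    ∀ fuel queue visited ed, bfsA graph fuel queue visited ed = bfsB adj fuel queue visited ed := by
  intro fuel
  induction fuel with
  | zero => intro queue visited ed; rfl
  | succ n ih =>
    intro queue visited ed
    cases queue with
    | nil => rfl
    | cons node q =>
      simp only [bfsA, bfsB]
      by_cases hv : PySem.Set.contains visited node = true
      · rw [if_pos hv, if_pos hv]
        exact ih q visited ed
      · rw [if_neg hv, if_neg hv]
        rw [ih, bodyA_eq graph node (PySem.Set.add visited node) (q, ed), ← h node]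

-- ===== VERDICT (by name: the statement is the Claim_ definition above) =====
theorem remove_rpki_spec : Claim_equal_remove_rpki := by
  intro links rpkis attacker _
  unfold Spec_remove_rpki remove_rpki remove_rpki_alt
  rw [filt_eq, List.nil_append]
  exact bfs_eq _ _ (buildAdj_getD links (PySem.Set.ofList rpkis)) _ _ _ _
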